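-- pv_equiv track=rewrite | github.com/clairej12/touchdown-dataset | metadata/deduplicate.py | remove_consecutive_repeats
-- ===== SOURCE A (Python) =====
-- def remove_consecutive_repeats(lst):
--     idx_kept = [0]
--     idx = 0
--     if not lst:
--         return lst  # Handle empty list case
--     result = [lst[0]]  # Start with the first element
--     for i,item in enumerate(lst[1:]):
--         if item != result[-1]:  # Add only if different from the last added item
--             result.append(item)
--             idx += 1
--             idx_kept.append(i+1)
--     return result, idx_kept
-- ===== SOURCE B (Python) =====
-- def remove_consecutive_repeats(lst):
--     if not lst:
--         return lst  # Handle empty list case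
--     result = []
--     idx_kept = []
--     i = 0
--     n = len(lst)
--     while i < n:
--         result.append(lst[i])
--         idx_kept.append(i)
--         j = i + 1
--         while j < n and lst[j] == lst[i]:
--             j += 1
--         i = j  # jump over the whole run of equal elements
--     return result, idx_kept
-- ===== Notes on version B (the rewrite author's own statement) =====
-- stated objective: alternative
-- what changed: B scans by index and skips each whole run of equal elements with an inner while loop, taking the run's first value and index, instead of A's fold that compares every item against the last appended result element.
-- outside the precondition, e.g. on remove_consecutive_repeats([]): A returns (), B returns ()
import Mathlib
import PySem

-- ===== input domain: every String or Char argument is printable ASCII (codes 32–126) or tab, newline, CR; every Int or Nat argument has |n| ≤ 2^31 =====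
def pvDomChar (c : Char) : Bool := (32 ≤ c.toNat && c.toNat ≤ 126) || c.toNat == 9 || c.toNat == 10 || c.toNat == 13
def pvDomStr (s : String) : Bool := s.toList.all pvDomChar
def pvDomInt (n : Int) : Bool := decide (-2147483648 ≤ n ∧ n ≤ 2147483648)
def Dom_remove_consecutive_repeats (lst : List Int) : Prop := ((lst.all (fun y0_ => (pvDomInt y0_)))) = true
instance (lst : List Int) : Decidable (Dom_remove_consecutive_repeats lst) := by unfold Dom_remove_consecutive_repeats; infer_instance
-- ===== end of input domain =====

-- B replaces A's compare-against-last-result fold by an index scan that jumps over each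
-- run of equal elements (objective: alternative decomposition, same cost); return value only.

-- ===== PORT A =====
-- A's loop: for i,item in enumerate(lst[1:]): if item != result[-1]: append to result and idx_kept.
-- result is nonempty throughout, so result[-1] is exactly getLast!.
def remove_consecutive_repeats (lst : List Int) : List Int × List Int :=
  match lst with
  | [] => ([], [])   -- Python returns the bare list lst here (not a tuple); excluded by Pre_
  | x :: _ =>
    let st := (PySem.List.enumerate (PySem.List.slice lst (some 1) none) 0).foldl
      (fun (st : List Int × List Int × Int) p =>
        if p.2 ≠ st.1.getLast! then (st.1 ++ [p.2], st.2.1 ++ [p.1 + 1], st.2.2 + 1) else st)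
      ([x], [(0 : Int)], (0 : Int))
    (st.1, st.2.1)

-- ===== PORT B =====
-- B's outer while over positions i, inner while skipping the run lst[i..]: transcribed as a
-- recursion over the enumerated suffix; the inner 'while lst[j] == lst[i]' is the dropWhile.
def rcrRuns : List (Int × Int) → List Int × List Int
  | [] => ([], [])
  | (i, v) :: rest =>
    let rest' := rest.dropWhile (fun p => p.2 == v)
    let r := rcrRuns rest'
    (v :: r.1, i :: r.2)
  termination_by l => l.length
  decreasing_by
    simp only [List.length_cons]
    exact Nat.lt_succ_of_le (List.length_dropWhile_le _ _)

def remove_consecutive_repeats_alt (lst : List Int) : List Int × List Int :=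
  match lst with
  | [] => ([], [])   -- Python returns the bare list lst here (not a tuple); excluded by Pre_
  | _ :: _ => rcrRuns (PySem.List.enumerate lst 0)

-- ===== PRECONDITION & SPEC =====
-- Pre_ excludes only the empty list, on which A (and B) return the bare input list instead of
-- a (result, idx_kept) tuple — a value outside the declared return type.
def Pre_remove_consecutive_repeats (lst : List Int) : Prop := lst ≠ []
instance (lst : List Int) : Decidable (Pre_remove_consecutive_repeats lst) := by
  unfold Pre_remove_consecutive_repeats; infer_instance

def pvWitness_remove_consecutive_repeats : List Int := [3, 3, 1]

def Spec_remove_consecutive_repeats (lst : List Int) (out : List Int × List Int) : Prop := out = remove_consecutive_repeats_alt lst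
instance (lst : List Int) (out : List Int × List Int) : Decidable (Spec_remove_consecutive_repeats lst out) := by unfold Spec_remove_consecutive_repeats; infer_instance

-- ===== CLAIM (what is proved, stated in full; the proofs are below) =====
def Claim_equal_remove_consecutive_repeats : Prop := ∀ (lst : List Int), Dom_remove_consecutive_repeats lst → Pre_remove_consecutive_repeats lst → Spec_remove_consecutive_repeats lst (remove_consecutive_repeats lst)

-- ===== LEMMAS AND PROOFS =====

-- Reference recursion both ports are reduced to: gRef prev s t = (values kept, indices kept)
-- among t, where prev is the last kept value and s the index of t's head.
def gRef (prev : Int) (s : Int) : List Int → List Int × List Int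
  | [] => ([], [])
  | x :: xs =>
    if x = prev then gRef prev (s + 1) xs
    else
      let r := gRef x (s + 1) xs
      (x :: r.1, s :: r.2)

theorem getLast!_concat (res : List Int) (x : Int) : (res ++ [x]).getLast! = x := by
  induction res with
  | nil => rfl
  | cons a t ih =>
    cases t with
    | nil => rfl
    | cons b u =>
      rw [List.cons_append, List.getLast!]
      exact ih

-- A's fold over the enumerated tail, from any nonempty accumulated result.
theorem foldA_eq (t : List Int) : ∀ (s : Int) (res ik : List Int) (idx : Int), res ≠ [] →
    (PySem.List.enumerate t s).foldl
      (fun (st : List Int × List Int × Int) p =>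
        if p.2 ≠ st.1.getLast! then (st.1 ++ [p.2], st.2.1 ++ [p.1 + 1], st.2.2 + 1) else st)
      (res, ik, idx)
    = (res ++ (gRef res.getLast! (s + 1) t).1,
       ik ++ (gRef res.getLast! (s + 1) t).2,
       idx + ((gRef res.getLast! (s + 1) t).1.length : Int)) := by
  induction t with
  | nil => intro s res ik idx _; simp [PySem.List.enumerate, gRef]
  | cons x xs ih =>
    intro s res ik idx hres
    rw [PySem.List.enumerate_cons]
    by_cases hx : x = res.getLast!
    · simp only [List.foldl_cons, hx, ne_eq, not_true_eq_false, if_false]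
      rw [ih (s + 1) res ik idx hres]
      simp [gRef]
    · simp only [List.foldl_cons, ne_eq, hx, not_false_eq_true, if_true]
      rw [ih (s + 1) (res ++ [x]) (ik ++ [s + 1]) (idx + 1) (by simp)]
      rw [getLast!_concat]
      simp only [gRef, if_neg hx]
      refine congrArg₂ Prod.mk (by simp) (congrArg₂ Prod.mk (by simp) ?_)
      simp only [List.length_cons]
      push_cast
      ring

-- B's run-skipping recursion, applied after dropping the current run, is gRef.
theorem rcrRuns_dropWhile_eq (t : List Int) : ∀ (v s : Int),
    rcrRuns ((PySem.List.enumerate t s).dropWhile (fun p => p.2 == v)) = gRef v s t := by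
  induction t with
  | nil => intro v s; simp [PySem.List.enumerate, rcrRuns, gRef]
  | cons x xs ih =>
    intro v s
    rw [PySem.List.enumerate_cons]
    by_cases hx : x = v
    · rw [List.dropWhile_cons_of_pos (by simp [hx])]
      rw [ih v (s + 1)]
      simp [gRef, hx]
    · rw [List.dropWhile_cons_of_neg (by simp [hx])]
      rw [rcrRuns]
      rw [ih x (s + 1)]
      simp [gRef, hx]

theorem alt_eq (x : Int) (t : List Int) :
    remove_consecutive_repeats_alt (x :: t)
      = (x :: (gRef x 1 t).1, 0 :: (gRef x 1 t).2) := by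
  rw [remove_consecutive_repeats_alt]
  rw [PySem.List.enumerate_cons, rcrRuns]
  rw [rcrRuns_dropWhile_eq t x (0 + 1)]
  norm_num

-- ===== VERDICT (by name: the statement is the Claim_ definition above) =====
theorem remove_consecutive_repeats_spec : Claim_equal_remove_consecutive_repeats := by
  intro lst _ hpre
  unfold Spec_remove_consecutive_repeats
  match lst with
  | [] => exact absurd rfl hpre
  | x :: t =>
    rw [alt_eq, remove_consecutive_repeats]
    simp only [PySem.List.slice_from_one, List.tail_cons]
    rw [foldA_eq t 0 [x] [(0 : Int)] 0 (by simp)]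
    norm_num
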